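-- pv_equiv track=rewrite | github.com/miliar/Code_Jam_Webscraper | Solutions_python/Problem_207/327.py | minspe0
-- ===== SOURCE A (Python) =====
-- def minspe0(r, y, b):
--     inventory = [r, y, b]
--     names = ['R', 'Y', 'B']
--     mx = max(inventory)
--     maxim = [i for i in range(3) if inventory[i] == mx]
--     i = maxim[0]
--     inventory[i] -= 1
--     r, y, b = inventory
--     return names[i], r, y, b
-- ===== SOURCE B (Python) =====
-- def minspe0(r, y, b):
--     if r >= y and r >= b:
--         return 'R', r - 1, y, b
--     elif y >= b:
--         return 'Y', r, y - 1, b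
--     else:
--         return 'B', r, y, b - 1
-- ===== Notes on version B (the rewrite author's own statement) =====
-- stated objective: simpler
-- what changed: Replaces the list/max/comprehension argmax machinery with a direct three-way comparison chain that preserves the R>Y>B tie-break.
import Mathlib
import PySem

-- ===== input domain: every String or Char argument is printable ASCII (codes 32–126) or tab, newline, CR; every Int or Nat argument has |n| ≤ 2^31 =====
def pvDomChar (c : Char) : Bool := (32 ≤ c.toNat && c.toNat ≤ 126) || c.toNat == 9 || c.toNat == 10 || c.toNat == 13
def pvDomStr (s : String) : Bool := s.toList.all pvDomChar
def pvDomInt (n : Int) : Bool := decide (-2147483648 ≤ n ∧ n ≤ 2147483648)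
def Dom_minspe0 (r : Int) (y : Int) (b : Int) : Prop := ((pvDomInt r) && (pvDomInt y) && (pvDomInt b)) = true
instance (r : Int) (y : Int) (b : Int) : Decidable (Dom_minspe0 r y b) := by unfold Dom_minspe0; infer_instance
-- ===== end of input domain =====

-- B replaces A's list/max/comprehension argmax machinery with a direct comparison chain (objective: simpler).
-- ===== PORT A =====
def minspe0 (r : Int) (y : Int) (b : Int) : String × Int × Int × Int :=
  let inventory : List Int := [r, y, b]
  let names : List String := ["R", "Y", "B"]
  let mx : Int := (PySem.List.max? inventory (fun x => x)).getD 0      -- max(inventory); list nonempty, so some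
  let maxim : List Int := (PySem.List.pyRange 0 3 1).filter (fun i => PySem.List.pyGetD inventory i 0 == mx)
  let i : Int := (PySem.List.pyGet? maxim 0).getD 0                    -- maxim[0]; maxim nonempty
  let inventory' := PySem.List.pySetD inventory i (PySem.List.pyGetD inventory i 0 - 1)   -- inventory[i] -= 1
  match inventory' with
  | [r', y', b'] => (PySem.List.pyGetD names i "", r', y', b')
  | _ => ("", 0, 0, 0)                                                 -- unreachable: length is 3

-- ===== PORT B =====
def minspe0_alt (r : Int) (y : Int) (b : Int) : String × Int × Int × Int :=
  if r ≥ y ∧ r ≥ b then ("R", r - 1, y, b)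
  else if y ≥ b then ("Y", r, y - 1, b)
  else ("B", r, y, b - 1)

-- ===== PRECONDITION & SPEC =====
def Spec_minspe0 (r : Int) (y : Int) (b : Int) (out : String × Int × Int × Int) : Prop := out = minspe0_alt r y b
instance (r : Int) (y : Int) (b : Int) (out : String × Int × Int × Int) : Decidable (Spec_minspe0 r y b out) := by unfold Spec_minspe0; infer_instance

-- ===== CLAIM (what is proved, stated in full; the proofs are below) =====
def Claim_equal_minspe0 : Prop := ∀ (r : Int) (y : Int) (b : Int), Dom_minspe0 r y b → Spec_minspe0 r y b (minspe0 r y b)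

-- ===== LEMMAS AND PROOFS =====

-- ===== VERDICT (by name: the statement is the Claim_ definition above) =====
theorem hrange3 : PySem.List.pyRange 0 3 1 = [0, 1, 2] := by decide

theorem stepR (r y b : Int) (h1 : y ≤ r) (h2 : b ≤ r) : minspe0 r y b = ("R", r - 1, y, b) := by
  unfold minspe0
  have hmx : PySem.List.max? [r, y, b] (fun x => x) = some r := by
    rw [PySem.List.max?_id_cons]
    simp [List.foldl, max_eq_left h1, max_eq_left h2]
  simp only [hmx, hrange3, Option.getD_some, List.filter]
  norm_num [PySem.List.pyGetD_natCast, PySem.List.pyGet?, PySem.List.pyIdx?, PySem.List.pySetD, PySem.List.pySet?]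

theorem stepY (r y b : Int) (h1 : r < y) (h2 : b ≤ y) : minspe0 r y b = ("Y", r, y - 1, b) := by
  unfold minspe0
  have hmx : PySem.List.max? [r, y, b] (fun x => x) = some y := by
    rw [PySem.List.max?_id_cons]
    simp [List.foldl, max_eq_right (le_of_lt h1), max_eq_left h2]
  have hne : (r == y) = false := by simp [Int.ne_of_lt h1]
  have g1 : PySem.List.pyGetD [r, y, b] (1 : Int) 0 = y := by
    norm_num [PySem.List.pyGetD, PySem.List.pyIdx?, show Int.toNat 2 = 2 from rfl, show Int.toNat 1 = 1 from rfl]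
  have n1 : PySem.List.pyGetD ["R", "Y", "B"] (1 : Int) "" = "Y" := by
    norm_num [PySem.List.pyGetD, PySem.List.pyIdx?, show Int.toNat 2 = 2 from rfl, show Int.toNat 1 = 1 from rfl]
  have s1 : PySem.List.pySetD [r, y, b] (1 : Int) (y - 1) = [r, y - 1, b] := by
    norm_num [PySem.List.pySetD, PySem.List.pySet?, PySem.List.pyIdx?, show Int.toNat 2 = 2 from rfl, show Int.toNat 1 = 1 from rfl]
  simp only [hmx, hrange3, Option.getD_some, List.filter]
  norm_num [PySem.List.pyGetD_natCast, PySem.List.pyGet?, PySem.List.pyIdx?,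
            hne, g1, n1, s1, Int.ne_of_lt h1]

theorem stepB (r y b : Int) (h1 : r < b) (h2 : y < b) : minspe0 r y b = ("B", r, y, b - 1) := by
  unfold minspe0
  have hmx : PySem.List.max? [r, y, b] (fun x => x) = some b := by
    rw [PySem.List.max?_id_cons]
    simp [List.foldl, max_eq_right (le_of_lt (max_lt h1 h2))]
  have hne1 : (r == b) = false := by simp [Int.ne_of_lt h1]
  have hne2 : (y == b) = false := by simp [Int.ne_of_lt h2]
  have g1 : PySem.List.pyGetD [r, y, b] (1 : Int) 0 = y := by
    norm_num [PySem.List.pyGetD, PySem.List.pyIdx?, show Int.toNat 2 = 2 from rfl, show Int.toNat 1 = 1 from rfl]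
  have g2 : PySem.List.pyGetD [r, y, b] (2 : Int) 0 = b := by
    norm_num [PySem.List.pyGetD, PySem.List.pyIdx?, show Int.toNat 2 = 2 from rfl, show Int.toNat 1 = 1 from rfl]
  have n2 : PySem.List.pyGetD ["R", "Y", "B"] (2 : Int) "" = "B" := by
    norm_num [PySem.List.pyGetD, PySem.List.pyIdx?, show Int.toNat 2 = 2 from rfl, show Int.toNat 1 = 1 from rfl]
  have s2 : PySem.List.pySetD [r, y, b] (2 : Int) (b - 1) = [r, y, b - 1] := by
    norm_num [PySem.List.pySetD, PySem.List.pySet?, PySem.List.pyIdx?, show Int.toNat 2 = 2 from rfl, show Int.toNat 1 = 1 from rfl]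
  simp only [hmx, hrange3, Option.getD_some, List.filter]
  norm_num [PySem.List.pyGetD_natCast, PySem.List.pyGet?, PySem.List.pyIdx?,
            hne1, hne2, g1, g2, n2, s2, Int.ne_of_lt h1, Int.ne_of_lt h2]

theorem minspe0_key (r y b : Int) : minspe0 r y b = minspe0_alt r y b := by
  unfold minspe0_alt
  split_ifs with hA hB
  · exact stepR r y b hA.1 hA.2
  · exact stepY r y b (by omega) hB
  · exact stepB r y b (by omega) (by omega)

theorem minspe0_spec : Claim_equal_minspe0 := by
  intro r y b _
  unfold Spec_minspe0
  exact minspe0_key r y b
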